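-- pv_equiv track=rewrite | github.com/TodFrog/RailSafeNet_LiDAR | videoAssessor.py | find_dist_from_edges
-- ===== SOURCE A (Python) =====
-- def find_dist_from_edges(edges_dict, left_border, right_border, real_life_width_mm, real_life_target_mm):
--     diffs_width = {k: max(e - s for s, e in v) for k, v in edges_dict.items() if v}
--     scale_factors = {k: real_life_width_mm / v for k, v in diffs_width.items() if v > 0}
--     target_distances_px = {k: int(real_life_target_mm / v) for k, v in scale_factors.items() if v > 0}
--
--     # Border width constraint: Limit to 1.5x rail width to prevent invading adjacent tracks
--     # This prevents danger zones from extending too far beyond the ego-track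
--     for k in target_distances_px.keys():
--         rail_width_px = diffs_width.get(k, 100)  # Detected rail width in pixels
--         max_border_extension = int(rail_width_px * 1.5)  # Max 1.5x rail width
--         target_distances_px[k] = min(target_distances_px[k], max_border_extension)
--
--     end_points_left, end_points_right = {}, {}
--     for point in left_border:
--         y = point[1]
--         if y in target_distances_px:
--             end_points_left[y] = point[0] - target_distances_px[y]
--     for point in right_border:
--         y = point[1]
--         if y in target_distances_px:
--             end_points_right[y] = point[0] + target_distances_px[y]
--     return end_points_left, end_points_right
-- ===== SOURCE B (Python) =====
-- def find_dist_from_edges(edges_dict, left_border, right_border, real_life_width_mm, real_life_target_mm):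
--     # Border-driven: no target dictionary is precomputed over the edge keys; each
--     # border point's clamped distance is computed on demand from edges_dict by key lookup.
--     def target_at(y):
--         v = edges_dict.get(y)
--         if not v:
--             return None
--         w = max(e - s for s, e in v)
--         if w <= 0 or real_life_width_mm <= 0:
--             return None
--         return min(int(real_life_target_mm / (real_life_width_mm / w)), int(w * 1.5))
--
--     end_points_left, end_points_right = {}, {}
--     for x, y in left_border:
--         t = target_at(y)
--         if t is not None:
--             end_points_left[y] = x - t
--     for x, y in right_border:
--         t = target_at(y)
--         if t is not None:
--             end_points_right[y] = x + t
--     return end_points_left, end_points_right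
-- ===== Notes on version B (the rewrite author's own statement) =====
-- stated objective: alternative
-- what changed: A is edges-driven: it precomputes a clamped-target dictionary over all edge keys in four staged passes (three chained dict comprehensions plus a clamp loop) and then maps the borders through it; B is border-driven: it builds no target dictionary at all and computes each border point's clamped distance on demand from edges_dict by key lookup, so the staged intermediate dicts disappear and edge keys never hit by a border point are never processed.
import Mathlib
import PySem

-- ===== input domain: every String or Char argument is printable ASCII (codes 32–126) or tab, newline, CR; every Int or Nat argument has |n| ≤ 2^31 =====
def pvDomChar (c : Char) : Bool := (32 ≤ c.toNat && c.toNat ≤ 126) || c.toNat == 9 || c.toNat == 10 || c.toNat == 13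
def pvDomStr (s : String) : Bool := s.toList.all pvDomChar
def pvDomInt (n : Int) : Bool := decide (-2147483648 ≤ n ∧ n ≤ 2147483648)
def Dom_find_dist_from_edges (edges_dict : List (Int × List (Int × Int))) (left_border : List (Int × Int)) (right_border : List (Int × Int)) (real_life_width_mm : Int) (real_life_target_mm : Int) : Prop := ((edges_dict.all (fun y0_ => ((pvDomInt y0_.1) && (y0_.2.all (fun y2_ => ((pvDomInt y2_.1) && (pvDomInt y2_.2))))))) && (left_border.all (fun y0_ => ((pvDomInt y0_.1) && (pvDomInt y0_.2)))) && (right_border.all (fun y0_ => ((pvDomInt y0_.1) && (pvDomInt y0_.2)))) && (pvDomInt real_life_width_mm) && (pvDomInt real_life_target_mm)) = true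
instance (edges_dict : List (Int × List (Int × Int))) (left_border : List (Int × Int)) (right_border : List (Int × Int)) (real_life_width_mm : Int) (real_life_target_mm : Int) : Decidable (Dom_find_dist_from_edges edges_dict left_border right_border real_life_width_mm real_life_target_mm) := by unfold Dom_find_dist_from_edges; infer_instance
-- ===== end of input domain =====

-- A is edges-driven (precompute a clamped-target dict over all edge keys in four staged passes,
-- then map the borders through it); B is border-driven (no target dict at all: each border point's
-- clamped distance is computed on demand from edges_dict by key lookup). Objective: alternative.
-- Both Pythons use IEEE-754 double division ('real_life_width_mm / w', 'real_life_target_mm / scale');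
-- the shared helpers below model that bit-exactly (round to nearest, ties to even) on the magnitudes
-- reachable from Dom (no overflow/subnormals there), so both ports are exact on Dom.

-- ===== shared float primitives (language-level, used by BOTH ports, like PySem itself) =====

-- p/q (q > 0) rounded to nearest double, ties to even, returned as (M, E) with value M·2^E.
-- Exact whenever the true quotient's magnitude lies in [2^-247, 2^247] (normal, no overflow) — all uses below.
def roundDiv (p q : Int) : Int × Int :=
  if p = 0 then (0, 0) else
    let a : Nat := p.natAbs * 2 ^ 300
    let N : Nat := a / q.natAbs
    let r : Nat := a % q.natAbs
    let s : Nat := N.log2 + 1 - 53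
    let m0 : Nat := N / 2 ^ s
    let rem : Nat := N % 2 ^ s
    let m : Nat := if 2 * rem > 2 ^ s ∨ (2 * rem = 2 ^ s ∧ (0 < r ∨ m0 % 2 = 1)) then m0 + 1 else m0
    (p.sign * (m : Int), (s : Int) - 300)

-- Python float division a / b of two ints (b ≠ 0), as a double (M, E).
def floatDiv (a b : Int) : Int × Int :=
  if b > 0 then roundDiv a b else roundDiv (-a) (-b)

-- Python float division t / x of an int by a double x = (M, E), M ≠ 0, as a double.
def floatDivD (t : Int) (x : Int × Int) : Int × Int :=
  if x.2 ≤ 0 then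
    (if x.1 > 0 then roundDiv (t * 2 ^ (-x.2).toNat) x.1 else roundDiv (-(t * 2 ^ (-x.2).toNat)) (-x.1))
  else
    (if x.1 > 0 then roundDiv t (x.1 * 2 ^ x.2.toNat) else roundDiv (-t) (-(x.1 * 2 ^ x.2.toNat)))

-- Python int(x) of a double x = (M, E): truncation toward zero.
def truncD (x : Int × Int) : Int :=
  if 0 ≤ x.2 then x.1 * 2 ^ x.2.toNat else x.1.sign * ((x.1.natAbs / 2 ^ (-x.2).toNat : Nat) : Int)

-- Python int(t / x) for int t and double x.
def intDivD (t : Int) (x : Int × Int) : Int := truncD (floatDivD t x)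

-- Python int(w * 1.5): w*1.5 is the exact double 3w/2 for |3w| < 2^53; int truncates toward zero.
def int15 (w : Int) : Int := (3 * w).sign * (((3 * w).natAbs / 2 : Nat) : Int)

-- max(e - s for s, e in v) for non-empty v (Python max over a non-empty int generator).
def maxDiff (v : List (Int × Int)) : Int :=
  match v.map (fun p => p.2 - p.1) with
  | [] => 0   -- unreachable: guarded by 'if v' / 'if not v' in both Pythons
  | h :: t => t.foldl max h

-- ===== PORT A =====
-- diffs_width = {k: max(e - s for s, e in v) for k, v in edges_dict.items() if v}
def a_diffs (edges_dict : List (Int × List (Int × Int))) : PySem.Dict Int Int :=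
  (PySem.Dict.ofList edges_dict).items.foldl
    (fun d kv => if kv.2 ≠ [] then d.insert kv.1 (maxDiff kv.2) else d) PySem.Dict.empty

-- scale_factors = {k: real_life_width_mm / v for k, v in diffs_width.items() if v > 0}  (float values)
def a_scales (edges_dict : List (Int × List (Int × Int))) (real_life_width_mm : Int) : PySem.Dict Int (Int × Int) :=
  (a_diffs edges_dict).items.foldl
    (fun d kv => if kv.2 > 0 then d.insert kv.1 (floatDiv real_life_width_mm kv.2) else d) PySem.Dict.empty

-- target_distances_px = {k: int(real_life_target_mm / v) for k, v in scale_factors.items() if v > 0}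
-- ('v > 0' on a double holds iff its significand is positive)
def a_targets0 (edges_dict : List (Int × List (Int × Int))) (real_life_width_mm real_life_target_mm : Int) : PySem.Dict Int Int :=
  (a_scales edges_dict real_life_width_mm).items.foldl
    (fun d kv => if kv.2.1 > 0 then d.insert kv.1 (intDivD real_life_target_mm kv.2) else d) PySem.Dict.empty

-- for k in target_distances_px.keys(): ... target_distances_px[k] = min(target_distances_px[k], int(rail_width_px * 1.5))
-- (k is always present, so d[k] is d.getD k 0; the write is an insert at an existing key)
def a_targets (edges_dict : List (Int × List (Int × Int))) (real_life_width_mm real_life_target_mm : Int) : PySem.Dict Int Int :=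
  (a_targets0 edges_dict real_life_width_mm real_life_target_mm).keys.foldl
    (fun d k =>
      let rail_width_px := (a_diffs edges_dict).getD k 100
      let max_border_extension := int15 rail_width_px
      d.insert k (min (d.getD k 0) max_border_extension))
    (a_targets0 edges_dict real_life_width_mm real_life_target_mm)

def find_dist_from_edges (edges_dict : List (Int × List (Int × Int))) (left_border : List (Int × Int)) (right_border : List (Int × Int)) (real_life_width_mm : Int) (real_life_target_mm : Int) : (List (Int × Int)) × (List (Int × Int)) :=
  let tgt := a_targets edges_dict real_life_width_mm real_life_target_mm
  let end_points_left := left_border.foldl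
    (fun d point => if tgt.contains point.2 then d.insert point.2 (point.1 - tgt.getD point.2 0) else d)
    PySem.Dict.empty
  let end_points_right := right_border.foldl
    (fun d point => if tgt.contains point.2 then d.insert point.2 (point.1 + tgt.getD point.2 0) else d)
    PySem.Dict.empty
  (end_points_left.items, end_points_right.items)

-- ===== PORT B =====
-- target_at(y): on-demand per-point computation, looked up in edges_dict by key; no target dict.
def bTarget (edges_dict : List (Int × List (Int × Int))) (real_life_width_mm real_life_target_mm : Int) (y : Int) : Option Int :=
  match (PySem.Dict.ofList edges_dict).get? y with
  | none => none            -- edges_dict.get(y) is None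
  | some v =>
    if v = [] then none     -- 'if not v'
    else
      let w := maxDiff v
      if w ≤ 0 ∨ real_life_width_mm ≤ 0 then none
      else some (min (intDivD real_life_target_mm (floatDiv real_life_width_mm w)) (int15 w))

def find_dist_from_edges_alt (edges_dict : List (Int × List (Int × Int))) (left_border : List (Int × Int)) (right_border : List (Int × Int)) (real_life_width_mm : Int) (real_life_target_mm : Int) : (List (Int × Int)) × (List (Int × Int)) :=
  let end_points_left := left_border.foldl
    (fun d point =>
      match bTarget edges_dict real_life_width_mm real_life_target_mm point.2 with
      | some t => d.insert point.2 (point.1 - t)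
      | none => d)
    PySem.Dict.empty
  let end_points_right := right_border.foldl
    (fun d point =>
      match bTarget edges_dict real_life_width_mm real_life_target_mm point.2 with
      | some t => d.insert point.2 (point.1 + t)
      | none => d)
    PySem.Dict.empty
  (end_points_left.items, end_points_right.items)

-- ===== PRECONDITION & SPEC =====
def Spec_find_dist_from_edges (edges_dict : List (Int × List (Int × Int))) (left_border : List (Int × Int)) (right_border : List (Int × Int)) (real_life_width_mm : Int) (real_life_target_mm : Int) (out : (List (Int × Int)) × (List (Int × Int))) : Prop := out = find_dist_from_edges_alt edges_dict left_border right_border real_life_width_mm real_life_target_mm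
instance (edges_dict : List (Int × List (Int × Int))) (left_border : List (Int × Int)) (right_border : List (Int × Int)) (real_life_width_mm : Int) (real_life_target_mm : Int) (out : (List (Int × Int)) × (List (Int × Int))) : Decidable (Spec_find_dist_from_edges edges_dict left_border right_border real_life_width_mm real_life_target_mm out) := by unfold Spec_find_dist_from_edges; infer_instance

-- ===== CLAIM (what is proved, stated in full; the proofs are below) =====
def Claim_equal_find_dist_from_edges : Prop := ∀ (edges_dict : List (Int × List (Int × Int))) (left_border : List (Int × Int)) (right_border : List (Int × Int)) (real_life_width_mm : Int) (real_life_target_mm : Int), Dom_find_dist_from_edges edges_dict left_border right_border real_life_width_mm real_life_target_mm → Spec_find_dist_from_edges edges_dict left_border right_border real_life_width_mm real_life_target_mm (find_dist_from_edges edges_dict left_border right_border real_life_width_mm real_life_target_mm)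

-- ===== LEMMAS AND PROOFS =====

-- ---- generic guarded-insert fold: items as a filterMap ----

def pvStep {a b : Type} (g : Int × a → Option b) : PySem.Dict Int b → Int × a → PySem.Dict Int b :=
  fun d kv => match g kv with
  | some v => d.insert kv.1 v
  | none => d

theorem items_foldl_pvStep {a b : Type} (l : List (Int × a)) (g : Int × a → Option b) :
    ∀ (d : PySem.Dict Int b), (l.map Prod.fst).Nodup → (∀ kv ∈ l, d.contains kv.1 = false) →
    (l.foldl (pvStep g) d).items
      = d.items ++ l.filterMap (fun kv => (g kv).map (fun v => (kv.1, v))) := by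
  induction l with
  | nil => intro d _ _; simp
  | cons kv t ih =>
    intro d hnd hfresh
    simp only [List.map_cons, List.nodup_cons, List.mem_map] at hnd
    cases hg : g kv with
    | none =>
      simp only [List.foldl_cons, pvStep, hg, List.filterMap_cons, Option.map_none]
      exact ih d hnd.2 (fun kv' h' => hfresh kv' (List.mem_cons_of_mem _ h'))
    | some v =>
      simp only [List.foldl_cons, pvStep, hg, List.filterMap_cons, Option.map_some]
      have hfresh0 : d.contains kv.1 = false := hfresh kv (List.mem_cons_self)
      have hstep : ∀ kv' ∈ t, (d.insert kv.1 v).contains kv'.1 = false := by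
        intro kv' h'
        rw [PySem.Dict.contains_insert]
        have hne : kv'.1 ≠ kv.1 := by
          intro he; exact hnd.1 ⟨kv', h', he⟩
        simp [hne, hfresh kv' (List.mem_cons_of_mem _ h')]
      rw [ih (d.insert kv.1 v) hnd.2 hstep,
          PySem.Dict.items_insert_of_not_contains d v hfresh0, List.append_assoc]
      rfl

theorem nodup_fst_filterMap {a b : Type} (l : List (Int × a)) (g : Int × a → Option b)
    (h : (l.map Prod.fst).Nodup) :
    ((l.filterMap (fun kv => (g kv).map (fun v => (kv.1, v)))).map Prod.fst).Nodup := by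
  induction l with
  | nil => simp
  | cons kv t ih =>
    simp only [List.map_cons, List.nodup_cons, List.mem_map] at h
    cases hg : g kv with
    | none => simpa [List.filterMap_cons, hg] using ih h.2
    | some v =>
      simp only [List.filterMap_cons, hg, Option.map_some, List.map_cons, List.nodup_cons]
      refine ⟨?_, ih h.2⟩
      intro hmem
      simp only [List.mem_map, List.mem_filterMap] at hmem
      obtain ⟨p, ⟨kv', hkv', hsome⟩, hfst⟩ := hmem
      cases hgk : g kv' with
      | none => rw [hgk] at hsome; simp at hsome
      | some w =>
        rw [hgk] at hsome
        simp only [Option.map_some, Option.some.injEq] at hsome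
        apply h.1
        refine ⟨kv', hkv', ?_⟩
        rw [← hsome] at hfst
        exact hfst

theorem mem_items_foldl_insert {a : Type} (l : List (Int × a)) :
    ∀ (d : PySem.Dict Int a) (p : Int × a),
      p ∈ (l.foldl (fun d q => d.insert q.1 q.2) d).items → p ∈ d.items ∨ p ∈ l := by
  induction l with
  | nil => intro d p hp; exact Or.inl hp
  | cons q t ih =>
    intro d p hp
    rcases ih (d.insert q.1 q.2) p hp with h | h
    · rw [PySem.Dict.mem_items_insert] at h
      rcases h with h | h
      · exact Or.inr (by rw [h]; exact List.mem_cons_self)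
      · exact Or.inl h.1
    · exact Or.inr (List.mem_cons_of_mem _ h)

theorem mem_items_ofList {a : Type} (l : List (Int × a)) (p : Int × a)
    (hp : p ∈ (PySem.Dict.ofList l).items) : p ∈ l := by
  have h := mem_items_foldl_insert l PySem.Dict.empty p
  rcases h hp with h0 | h0
  · simp [PySem.Dict.empty] at h0
  · exact h0

-- ---- the clamp loop: items as a map ----

theorem items_clamp (c : Int → Int) (ks : List Int) :
    ∀ (d : PySem.Dict Int Int), d.keys.Nodup → ks.Nodup → (∀ k ∈ ks, d.contains k = true) →
    (ks.foldl (fun d' k => d'.insert k (min (d'.getD k 0) (c k))) d).items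
      = d.items.map (fun p => if p.1 ∈ ks then (p.1, min p.2 (c p.1)) else p) := by
  induction ks with
  | nil => intro d _ _ _; simp
  | cons k0 t ih =>
    intro d hnd hks hmem
    simp only [List.nodup_cons] at hks
    have hc0 : d.contains k0 = true := hmem k0 List.mem_cons_self
    have hkeys : (d.insert k0 (min (d.getD k0 0) (c k0))).keys = d.keys :=
      PySem.Dict.keys_insert_of_contains d _ hc0
    have hmem' : ∀ k ∈ t, (d.insert k0 (min (d.getD k0 0) (c k0))).contains k = true := by
      intro k hk
      rw [PySem.Dict.contains_insert]
      simp [hmem k (List.mem_cons_of_mem _ hk)]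
    rw [List.foldl_cons, ih _ (by rw [hkeys]; exact hnd) hks.2 hmem',
        PySem.Dict.items_insert_of_contains d _ hc0, List.map_map]
    apply List.map_congr_left
    intro p hp
    by_cases h0 : p.1 = k0
    · have hval : d.getD k0 0 = p.2 := by
        have : (k0, p.2) ∈ d.items := by rw [← h0]; exact hp
        exact PySem.Dict.getD_of_mem_items d this hnd 0
      simp [Function.comp, h0, hval, hks.1]
    · simp only [Function.comp_apply, beq_iff_eq, h0, if_false]
      by_cases ht : p.1 ∈ t <;> simp [ht, h0]

-- ---- arithmetic facts ----

theorem roundDiv_pos_iff (p q : Int) (hq : 0 < q) (hp : p ≠ 0) (hb : q ≤ (p.natAbs : Int) * 2 ^ 300) :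
    (0 < (roundDiv p q).1 ↔ 0 < p) := by
  unfold roundDiv
  rw [if_neg hp]
  simp only
  set a : Nat := p.natAbs * 2 ^ 300 with ha
  set N : Nat := a / q.natAbs with hN
  set s : Nat := N.log2 + 1 - 53 with hs
  have hqn : 0 < q.natAbs := Int.natAbs_pos.mpr (by omega)
  have hN1 : 1 ≤ N := by
    rw [hN, Nat.le_div_iff_mul_le hqn, one_mul]
    have hqa : (q.natAbs : Int) = q := Int.natAbs_of_nonneg hq.le
    have : (q.natAbs : Int) ≤ (a : Int) := by
      rw [ha, hqa]
      push_cast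
      rwa [Int.abs_eq_natAbs]
    exact_mod_cast this
  have hm0 : 1 ≤ N / 2 ^ s := by
    rw [Nat.le_div_iff_mul_le (Nat.two_pow_pos s), one_mul]
    by_cases h53 : N.log2 + 1 ≤ 53
    · have : s = 0 := by omega
      rw [this]; simpa using hN1
    · have hsle : s ≤ N.log2 := by omega
      calc (2:Nat) ^ s ≤ 2 ^ N.log2 := Nat.pow_le_pow_right (by norm_num) hsle
      _ ≤ N := Nat.log2_self_le (by omega)
  have hm : 1 ≤ (if 2 * (N % 2 ^ s) > 2 ^ s ∨ (2 * (N % 2 ^ s) = 2 ^ s ∧ (0 < a % q.natAbs ∨ N / 2 ^ s % 2 = 1)) then N / 2 ^ s + 1 else N / 2 ^ s) := by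
    split <;> omega
  set m : Nat := (if 2 * (N % 2 ^ s) > 2 ^ s ∨ (2 * (N % 2 ^ s) = 2 ^ s ∧ (0 < a % q.natAbs ∨ N / 2 ^ s % 2 = 1)) then N / 2 ^ s + 1 else N / 2 ^ s) with hmdef
  have hmz : (1:Int) ≤ (m : Int) := by exact_mod_cast hm
  rcases lt_trichotomy p 0 with hneg | hzero | hpos
  · rw [Int.sign_eq_neg_one_of_neg hneg]
    constructor
    · intro habs; nlinarith
    · intro habs; omega
  · exact absurd hzero hp
  · rw [Int.sign_eq_one_of_pos hpos]
    constructor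
    · intro _; exact hpos
    · intro _; nlinarith

theorem foldl_max_le (B : Int) (t : List Int) :
    ∀ h : Int, h ≤ B → (∀ x ∈ t, x ≤ B) → t.foldl max h ≤ B := by
  induction t with
  | nil => intro h hh _; simpa using hh
  | cons x t ih =>
    intro h hh hx
    simp only [List.foldl_cons]
    exact ih _ (max_le hh (hx x List.mem_cons_self)) (fun y hy => hx y (List.mem_cons_of_mem _ hy))

theorem maxDiff_le (v : List (Int × Int)) (h : ∀ p ∈ v, p.2 - p.1 ≤ 2 ^ 32) :
    maxDiff v ≤ 2 ^ 32 := by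
  unfold maxDiff
  cases hv : v.map (fun p => p.2 - p.1) with
  | nil => norm_num
  | cons x t =>
    have hall : ∀ y ∈ v.map (fun p => p.2 - p.1), y ≤ 2 ^ 32 := by
      intro y hy
      simp only [List.mem_map] at hy
      obtain ⟨p, hp, rfl⟩ := hy
      exact h p hp
    rw [hv] at hall
    exact foldl_max_le _ t x (hall x List.mem_cons_self) (fun y hy => hall y (List.mem_cons_of_mem _ hy))

-- the float comparison 'scale > 0' agrees with the int comparison 'W > 0' when 0 < w ≤ 2^32
theorem floatDiv_fst_pos_iff (W w : Int) (hw : 0 < w) (hwb : w ≤ 2 ^ 32) :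
    (0 < (floatDiv W w).1 ↔ 0 < W) := by
  unfold floatDiv
  rw [if_pos hw]
  by_cases hW : W = 0
  · subst hW; simp [roundDiv]
  · apply roundDiv_pos_iff W w hw hW
    have h1 : (1:Int) ≤ (W.natAbs : Int) := by
      have : W.natAbs ≠ 0 := Int.natAbs_ne_zero.mpr hW
      omega
    have h2 : (2:Int) ^ 32 ≤ 2 ^ 300 := by
      have := pow_le_pow_right₀ (by norm_num : (1:Int) ≤ 2) (by norm_num : 32 ≤ 300)
      exact this
    calc w ≤ 2 ^ 32 := hwb
    _ ≤ 2 ^ 300 := h2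
    _ = 1 * 2 ^ 300 := (one_mul _).symm
    _ ≤ (W.natAbs : Int) * 2 ^ 300 := by
        apply mul_le_mul_of_nonneg_right h1
        positivity

-- ---- the pipeline characterizations of PORT A's staged dicts ----

theorem a_diffs_items (ed : List (Int × List (Int × Int))) :
    (a_diffs ed).items
      = (PySem.Dict.ofList ed).items.filterMap
          (fun kv => if kv.2 ≠ [] then some (kv.1, maxDiff kv.2) else none) := by
  unfold a_diffs
  have hfun : (fun (d : PySem.Dict Int Int) (kv : Int × List (Int × Int)) =>
      if kv.2 ≠ [] then d.insert kv.1 (maxDiff kv.2) else d)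
      = pvStep (fun kv => if kv.2 ≠ [] then some (maxDiff kv.2) else none) := by
    funext d kv
    by_cases h : kv.2 = [] <;> simp [pvStep, h]
  rw [hfun, items_foldl_pvStep _ _ PySem.Dict.empty
        (by simpa [PySem.Dict.keys] using PySem.Dict.nodup_keys_ofList ed)
        (fun kv _ => PySem.Dict.contains_empty kv.1)]
  have : (PySem.Dict.empty : PySem.Dict Int Int).items = [] := rfl
  rw [this, List.nil_append]
  apply List.filterMap_congr
  intro kv _
  by_cases h : kv.2 = [] <;> simp [h]

theorem items_guard_fold {a b : Type} (l : List (Int × a)) (P : Int × a → Prop) [DecidablePred P]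
    (f : Int × a → b) (h : (l.map Prod.fst).Nodup) :
    (l.foldl (fun d kv => if P kv then d.insert kv.1 (f kv) else d) PySem.Dict.empty).items
      = l.filterMap (fun kv => if P kv then some (kv.1, f kv) else none) := by
  have hfun : (fun (d : PySem.Dict Int b) (kv : Int × a) => if P kv then d.insert kv.1 (f kv) else d)
      = pvStep (fun kv => if P kv then some (f kv) else none) := by
    funext d kv; by_cases hP : P kv <;> simp [pvStep, hP]
  rw [hfun, items_foldl_pvStep l _ PySem.Dict.empty h (fun kv _ => PySem.Dict.contains_empty kv.1)]
  have hemp : (PySem.Dict.empty : PySem.Dict Int b).items = [] := rfl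
  rw [hemp, List.nil_append]
  apply List.filterMap_congr; intro kv _
  by_cases hP : P kv <;> simp [hP]

theorem nodup_fst_guard {a b : Type} (l : List (Int × a)) (P : Int × a → Prop) [DecidablePred P]
    (f : Int × a → b) (h : (l.map Prod.fst).Nodup) :
    ((l.filterMap (fun kv => if P kv then some (kv.1, f kv) else none)).map Prod.fst).Nodup := by
  have hsh : (fun (kv : Int × a) => if P kv then some (kv.1, f kv) else none)
      = (fun kv => ((if P kv then some (f kv) else none) : Option b).map (fun v => (kv.1, v))) := by
    funext kv; by_cases hP : P kv <;> simp [hP]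
  rw [hsh]
  exact nodup_fst_filterMap l _ h

-- canonical per-stage guard functions
def g3fn (W T : Int) : Int × List (Int × Int) → Option (Int × Int) :=
  fun kv => if kv.2 ≠ [] ∧ 0 < maxDiff kv.2 ∧ 0 < (floatDiv W (maxDiff kv.2)).1
    then some (kv.1, intDivD T (floatDiv W (maxDiff kv.2))) else none

def gBfn (W T : Int) : Int × List (Int × Int) → Option (Int × Int) :=
  fun kv => if kv.2 ≠ [] ∧ 0 < maxDiff kv.2 ∧ 0 < W
    then some (kv.1, min (intDivD T (floatDiv W (maxDiff kv.2))) (int15 (maxDiff kv.2))) else none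

theorem a_targets0_items (ed : List (Int × List (Int × Int))) (W T : Int) :
    (a_targets0 ed W T).items = (PySem.Dict.ofList ed).items.filterMap (g3fn W T) := by
  have hLnd : ((PySem.Dict.ofList ed).items.map Prod.fst).Nodup := by
    simpa [PySem.Dict.keys] using PySem.Dict.nodup_keys_ofList ed
  have h1 : (a_diffs ed).items
      = (PySem.Dict.ofList ed).items.filterMap
          (fun kv => if kv.2 ≠ [] then some (kv.1, maxDiff kv.2) else none) := a_diffs_items ed
  have h1nd : ((a_diffs ed).items.map Prod.fst).Nodup := by
    rw [h1]; exact nodup_fst_guard _ _ _ hLnd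
  have h2 : (a_scales ed W).items
      = (a_diffs ed).items.filterMap
          (fun kv => if kv.2 > 0 then some (kv.1, floatDiv W kv.2) else none) := by
    unfold a_scales
    exact items_guard_fold _ _ _ h1nd
  have h2nd : ((a_scales ed W).items.map Prod.fst).Nodup := by
    rw [h2]; exact nodup_fst_guard _ _ _ h1nd
  have h3 : (a_targets0 ed W T).items
      = (a_scales ed W).items.filterMap
          (fun kv => if kv.2.1 > 0 then some (kv.1, intDivD T kv.2) else none) := by
    unfold a_targets0
    exact items_guard_fold _ _ _ h2nd
  rw [h3, h2, h1, List.filterMap_filterMap, List.filterMap_filterMap]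
  apply List.filterMap_congr
  intro kv _
  by_cases hne : kv.2 = []
  · simp [hne, g3fn]
  · by_cases hw : 0 < maxDiff kv.2
    · by_cases hsc : 0 < (floatDiv W (maxDiff kv.2)).1
      · simp [hne, hw, hsc, g3fn, Option.bind]
      · simp [hne, hw, hsc, g3fn, Option.bind]
    · simp [hne, hw, g3fn, Option.bind]

theorem a_targets_items (ed : List (Int × List (Int × Int))) (W T : Int) :
    (a_targets ed W T).items
      = (a_targets0 ed W T).items.map
          (fun p => (p.1, min p.2 (int15 ((a_diffs ed).getD p.1 100)))) := by
  have hLnd : ((PySem.Dict.ofList ed).items.map Prod.fst).Nodup := by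
    simpa [PySem.Dict.keys] using PySem.Dict.nodup_keys_ofList ed
  have hnd : (a_targets0 ed W T).keys.Nodup := by
    have := a_targets0_items ed W T
    simp only [PySem.Dict.keys]
    rw [this]
    exact nodup_fst_guard _ _ _ hLnd
  have hmem : ∀ k ∈ (a_targets0 ed W T).keys, (a_targets0 ed W T).contains k = true := by
    intro k hk
    exact (PySem.Dict.contains_iff_mem_keys _ k).mpr hk
  unfold a_targets
  rw [items_clamp (fun k => int15 ((a_diffs ed).getD k 100)) _ _ hnd hnd hmem]
  apply List.map_congr_left
  intro p hp
  have : p.1 ∈ (a_targets0 ed W T).keys := by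
    simp only [PySem.Dict.keys]
    exact List.mem_map_of_mem hp
  simp [this]

-- A's fully-clamped target dict, items as one filterMap over the edges items.
theorem a_targets_items_gBfn (ed : List (Int × List (Int × Int))) (W T : Int)
    (hb : ∀ kv ∈ ed, ∀ p ∈ kv.2, p.2 - p.1 ≤ 2 ^ 32) :
    (a_targets ed W T).items = (PySem.Dict.ofList ed).items.filterMap (gBfn W T) := by
  have hLnd : ((PySem.Dict.ofList ed).items.map Prod.fst).Nodup := by
    simpa [PySem.Dict.keys] using PySem.Dict.nodup_keys_ofList ed
  have h1nd : ((a_diffs ed).items.map Prod.fst).Nodup := by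
    rw [a_diffs_items]; exact nodup_fst_guard _ _ _ hLnd
  rw [a_targets_items, a_targets0_items, List.map_filterMap]
  apply List.filterMap_congr
  intro kv hkv
  have hkved : kv ∈ ed := mem_items_ofList ed kv hkv
  have hwle : maxDiff kv.2 ≤ 2 ^ 32 := maxDiff_le kv.2 (hb kv hkved)
  by_cases hne : kv.2 = []
  · simp [g3fn, gBfn, hne]
  · by_cases hw : 0 < maxDiff kv.2
    · have hiff : (0 < (floatDiv W (maxDiff kv.2)).1 ↔ 0 < W) :=
        floatDiv_fst_pos_iff W (maxDiff kv.2) hw hwle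
      by_cases hW : 0 < W
      · have hsc : 0 < (floatDiv W (maxDiff kv.2)).1 := hiff.mpr hW
        have hgd : (a_diffs ed).getD kv.1 100 = maxDiff kv.2 := by
          have hmem : (kv.1, maxDiff kv.2) ∈ (a_diffs ed).items := by
            rw [a_diffs_items]
            exact List.mem_filterMap.mpr ⟨kv, hkv, by simp [hne]⟩
          have hnd1 : (a_diffs ed).keys.Nodup := by
            simpa [PySem.Dict.keys] using h1nd
          exact PySem.Dict.getD_of_mem_items _ hmem hnd1 100
        simp [g3fn, gBfn, hne, hw, hW, hsc, hgd]
      · have hsc : ¬ 0 < (floatDiv W (maxDiff kv.2)).1 := fun h => hW (hiff.mp h)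
        simp [g3fn, gBfn, hne, hw, hW, hsc]
    · simp [g3fn, gBfn, hne, hw]

-- ---- the bridge: A's target dict looked up at y IS B's on-demand target_at(y) ----

theorem a_targets_get? (ed : List (Int × List (Int × Int))) (W T : Int)
    (hb : ∀ kv ∈ ed, ∀ p ∈ kv.2, p.2 - p.1 ≤ 2 ^ 32) (y : Int) :
    (a_targets ed W T).get? y = bTarget ed W T y := by
  have hLnd : ((PySem.Dict.ofList ed).items.map Prod.fst).Nodup := by
    simpa [PySem.Dict.keys] using PySem.Dict.nodup_keys_ofList ed
  have hitems := a_targets_items_gBfn ed W T hb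
  have htnd : (a_targets ed W T).keys.Nodup := by
    simp only [PySem.Dict.keys]
    rw [hitems]
    have hsh : gBfn W T = (fun kv => ((if kv.2 ≠ [] ∧ 0 < maxDiff kv.2 ∧ 0 < W then
        some (min (intDivD T (floatDiv W (maxDiff kv.2))) (int15 (maxDiff kv.2))) else none) : Option Int).map
          (fun v => (kv.1, v))) := by
      funext kv; unfold gBfn; by_cases h : kv.2 ≠ [] ∧ 0 < maxDiff kv.2 ∧ 0 < W <;> simp [h]
    rw [hsh]
    exact nodup_fst_filterMap _ _ hLnd
  unfold bTarget
  cases hget : (PySem.Dict.ofList ed).get? y with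
  | none =>
    -- y is not an edges key, so it is no key of a_targets either
    have hnk : y ∉ (PySem.Dict.ofList ed).keys :=
      (PySem.Dict.get?_eq_none_iff_not_mem_keys _ y).mp hget
    rw [PySem.Dict.get?_eq_none_iff_not_mem_keys]
    simp only [PySem.Dict.keys]
    rw [hitems]
    intro hmem
    simp only [List.mem_map, List.mem_filterMap] at hmem
    obtain ⟨p, ⟨kv, hkv, hsome⟩, hfst⟩ := hmem
    unfold gBfn at hsome
    by_cases h : kv.2 ≠ [] ∧ 0 < maxDiff kv.2 ∧ 0 < W
    · rw [if_pos h] at hsome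
      simp only [Option.some.injEq] at hsome
      apply hnk
      simp only [PySem.Dict.keys]
      have : kv.1 = y := by rw [← hsome] at hfst; exact hfst
      rw [← this]
      exact List.mem_map_of_mem hkv
    · rw [if_neg h] at hsome; simp at hsome
  | some v =>
    have hkvmem : (y, v) ∈ (PySem.Dict.ofList ed).items :=
      PySem.Dict.mem_items_of_get?_eq_some _ hget
    by_cases hguard : v ≠ [] ∧ 0 < maxDiff v ∧ 0 < W
    · -- the guard fires: both sides yield the clamped target
      have hmem : (y, min (intDivD T (floatDiv W (maxDiff v))) (int15 (maxDiff v)))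
          ∈ (a_targets ed W T).items := by
        rw [hitems]
        exact List.mem_filterMap.mpr ⟨(y, v), hkvmem, by unfold gBfn; rw [if_pos hguard]⟩
      rw [PySem.Dict.get?_of_mem_items _ hmem htnd]
      have hne : ¬ v = [] := hguard.1
      have hng : ¬ (maxDiff v ≤ 0 ∨ W ≤ 0) := by
        rcases hguard with ⟨-, h1, h2⟩; omega
      simp [hne, hng]
    · -- the guard fails: y is no key of a_targets, and B returns none too
      have hnone : (a_targets ed W T).get? y = none := by
        rw [PySem.Dict.get?_eq_none_iff_not_mem_keys]
        simp only [PySem.Dict.keys]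
        rw [hitems]
        intro hmem
        simp only [List.mem_map, List.mem_filterMap] at hmem
        obtain ⟨p, ⟨kv, hkv, hsome⟩, hfst⟩ := hmem
        unfold gBfn at hsome
        by_cases h : kv.2 ≠ [] ∧ 0 < maxDiff kv.2 ∧ 0 < W
        · rw [if_pos h] at hsome
          simp only [Option.some.injEq] at hsome
          have hky : kv.1 = y := by rw [← hsome] at hfst; exact hfst
          -- uniqueness of keys in edges items: kv must be (y, v)
          have : kv.2 = v := by
            have hg2 : (PySem.Dict.ofList ed).get? kv.1 = some kv.2 :=
              PySem.Dict.get?_of_mem_items _ hkv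
                (by simpa [PySem.Dict.keys] using hLnd)
            rw [hky, hget] at hg2
            exact (Option.some.inj hg2).symm
          exact hguard ⟨this ▸ h.1, this ▸ h.2.1, h.2.2⟩
        · rw [if_neg h] at hsome; simp at hsome
      rw [hnone]
      by_cases hne : v = []
      · simp [hne]
      · have hng : maxDiff v ≤ 0 ∨ W ≤ 0 := by
          by_contra hcon
          rw [not_or] at hcon
          exact hguard ⟨hne, by omega, by omega⟩
        simp [hne, hng]

-- ===== VERDICT (by name: the statement is the Claim_ definition above) =====
theorem find_dist_from_edges_spec : Claim_equal_find_dist_from_edges := by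
  intro ed lb rb W T hdom
  unfold Spec_find_dist_from_edges
  unfold find_dist_from_edges find_dist_from_edges_alt
  have hb : ∀ kv ∈ ed, ∀ p ∈ kv.2, p.2 - p.1 ≤ 2 ^ 32 := by
    unfold Dom_find_dist_from_edges at hdom
    simp only [Bool.and_eq_true, List.all_eq_true, pvDomInt, decide_eq_true_eq] at hdom
    intro kv hkv p hp
    have h1 := (hdom.1.1.1.1 kv hkv).2 p hp
    omega
  have hstep : ∀ (d : PySem.Dict Int Int) (point : Int × Int) (sgn : Int → Int → Int),
      (if (a_targets ed W T).contains point.2 then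
        d.insert point.2 (sgn point.1 ((a_targets ed W T).getD point.2 0)) else d)
      = (match bTarget ed W T point.2 with
        | some t => d.insert point.2 (sgn point.1 t)
        | none => d) := by
    intro d point sgn
    have hq := a_targets_get? ed W T hb point.2
    rw [PySem.Dict.contains_eq_isSome_get?, PySem.Dict.getD_eq_get?_getD, hq]
    cases bTarget ed W T point.2 <;> simp
  have hL : (fun (d : PySem.Dict Int Int) (point : Int × Int) =>
      if (a_targets ed W T).contains point.2 then
        d.insert point.2 (point.1 - (a_targets ed W T).getD point.2 0) else d)
      = (fun d point => match bTarget ed W T point.2 with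
        | some t => d.insert point.2 (point.1 - t)
        | none => d) := by
    funext d point; exact hstep d point (fun a b => a - b)
  have hR : (fun (d : PySem.Dict Int Int) (point : Int × Int) =>
      if (a_targets ed W T).contains point.2 then
        d.insert point.2 (point.1 + (a_targets ed W T).getD point.2 0) else d)
      = (fun d point => match bTarget ed W T point.2 with
        | some t => d.insert point.2 (point.1 + t)
        | none => d) := by
    funext d point; exact hstep d point (fun a b => a + b)
  simp only [hL, hR]
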